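-- pv_equiv track=rewrite | github.com/klusignolo/Wordle-Solver | wordle_solver/search_utility.py | get_ordered_char_map
-- ===== SOURCE A (Python) =====
-- def get_ordered_char_map(words: "list[str]") -> "dict[chr, int]":
--     char_dict = {}
--     full_string = "".join(words)
--     for char in full_string:
--         if char in char_dict.keys():
--             char_dict[char] += 1
--         else:
--             char_dict[char] = 1
--     return {k: v for k, v in sorted(char_dict.items(), key=lambda item: item[1], reverse=True)}
-- ===== SOURCE B (Python) =====
-- def get_ordered_char_map(words: "list[str]") -> "dict[chr, int]":
--     counts = {}
--     for char in "".join(words):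
--         counts[char] = counts.get(char, 0) + 1
--     buckets = {}
--     for char, n in counts.items():
--         buckets.setdefault(n, []).append(char)
--     result = {}
--     for n in range(max(buckets, default=0), 0, -1):
--         for char in buckets.get(n, []):
--             result[char] = n
--     return result
-- ===== Notes on version B (the rewrite author's own statement) =====
-- stated objective: alternative
-- what changed: B replaces A's comparison sort of the (char, count) items by a counting/bucket pass: it inverts the frequency dict into count-buckets and emits the buckets with counts strictly descending, preserving first-occurrence order inside each bucket.
import Mathlib
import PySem

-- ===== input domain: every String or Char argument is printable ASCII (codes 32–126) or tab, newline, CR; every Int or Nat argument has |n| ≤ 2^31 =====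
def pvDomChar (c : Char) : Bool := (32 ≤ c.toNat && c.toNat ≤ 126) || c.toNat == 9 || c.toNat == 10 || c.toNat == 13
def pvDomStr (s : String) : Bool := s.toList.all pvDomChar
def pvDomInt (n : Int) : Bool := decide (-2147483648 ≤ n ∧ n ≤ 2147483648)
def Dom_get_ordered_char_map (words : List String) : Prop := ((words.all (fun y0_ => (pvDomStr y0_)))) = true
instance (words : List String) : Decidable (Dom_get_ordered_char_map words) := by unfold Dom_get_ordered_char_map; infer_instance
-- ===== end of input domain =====

-- B replaces A's comparison sort of the items by a counting/bucket pass: invert the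
-- frequency dict into count-buckets and emit them with counts descending (objective: alternative).

-- ===== PORT A =====
def get_ordered_char_map (words : List String) : List (String × Int) :=
  let full_string := PySem.Str.join "" words
  let char_dict : PySem.Dict String Int :=
    full_string.toList.foldl
      (fun d c =>
        if d.contains (String.ofList [c]) then d.modify (String.ofList [c]) 0 (· + 1)
        else d.insert (String.ofList [c]) 1)
      PySem.Dict.empty
  ((PySem.List.sorted char_dict.items (fun item => item.2) true).foldl
      (fun d p => d.insert p.1 p.2) PySem.Dict.empty).items

-- ===== PORT B =====
-- `buckets.setdefault(n, []).append(char)` appends to the list stored at n (an empty one if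
-- absent), i.e. `buckets[n] = buckets.get(n, []) + [char]`: ported as Dict.modify.
def get_ordered_char_map_alt (words : List String) : List (String × Int) :=
  let counts : PySem.Dict String Int :=
    (PySem.Str.join "" words).toList.foldl
      (fun d c => d.insert (String.ofList [c]) (d.getD (String.ofList [c]) 0 + 1))
      PySem.Dict.empty
  let buckets : PySem.Dict Int (List String) :=
    counts.items.foldl (fun b p => b.modify p.2 [] (· ++ [p.1])) PySem.Dict.empty
  let result : PySem.Dict String Int :=
    (PySem.List.pyRange (PySem.List.maxD buckets.keys (fun x => x) 0) 0 (-1)).foldl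
      (fun d n => (buckets.getD n []).foldl (fun d ch => d.insert ch n) d)
      PySem.Dict.empty
  result.items

-- ===== PRECONDITION & SPEC =====
def Spec_get_ordered_char_map (words : List String) (out : List (String × Int)) : Prop := out = get_ordered_char_map_alt words
instance (words : List String) (out : List (String × Int)) : Decidable (Spec_get_ordered_char_map words out) := by unfold Spec_get_ordered_char_map; infer_instance

-- ===== CLAIM (what is proved, stated in full; the proofs are below) =====
def Claim_equal_get_ordered_char_map : Prop := ∀ (words : List String), Dom_get_ordered_char_map words → Spec_get_ordered_char_map words (get_ordered_char_map words)

-- ===== LEMMAS AND PROOFS =====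

lemma pyRange_down (m : Int) :
    PySem.List.pyRange m 0 (-1) = (List.range m.toNat).map (fun (k : Nat) => m - (k : Int)) := by
  unfold PySem.List.pyRange
  norm_num
  split_ifs with h
  · exact List.map_congr_left (fun k _ => by ring)
  · have : m.toNat = 0 := by omega
    simp [this]

lemma mem_pyRange_down (m x : Int) : x ∈ PySem.List.pyRange m 0 (-1) ↔ 1 ≤ x ∧ x ≤ m := by
  rw [pyRange_down]
  simp only [List.mem_map, List.mem_range]
  constructor
  · rintro ⟨k, hk, rfl⟩; omega
  · rintro ⟨h1, h2⟩; exact ⟨(m - x).toNat, by omega, by omega⟩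

lemma pairwise_pyRange_down (m : Int) :
    (PySem.List.pyRange m 0 (-1)).Pairwise (fun a b => b < a) := by
  rw [pyRange_down, List.pairwise_map]
  exact List.pairwise_lt_range.imp (fun {a b} (h : a < b) => by omega)

lemma countA_eq_counter (chars : List Char) :
    chars.foldl
      (fun d c =>
        if d.contains (String.ofList [c]) then d.modify (String.ofList [c]) 0 (· + 1)
        else d.insert (String.ofList [c]) 1)
      PySem.Dict.empty
    = PySem.Dict.counter (chars.map (fun c => String.ofList [c])) := by
  rw [← PySem.Dict.foldl_insert_getD_add_one_eq_counter, List.foldl_map]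
  congr 1
  funext d c
  by_cases h : d.contains (String.ofList [c])
  · simp [h, PySem.Dict.modify]
  · rw [if_neg (by simp [h]), PySem.Dict.getD_of_not_contains _ _ (by simpa using h)]
    norm_num

lemma le_maxD_of_mem (xs : List Int) (x : Int) (hx : x ∈ xs) :
    x ≤ PySem.List.maxD xs (fun y => y) 0 := by
  unfold PySem.List.maxD
  cases hm : PySem.List.max? xs (fun y => y) with
  | none => rw [PySem.List.max?_eq_none_iff] at hm; simp [hm] at hx
  | some m => simpa using PySem.List.max?_isMax hm x hx

lemma insertBy_append_left {α : Type} (before : α → α → Bool) (x : α) (u v : List α)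
    (hu : ∀ y ∈ u, before x y = false) :
    PySem.List.insertBy before x (u ++ v) = u ++ PySem.List.insertBy before x v := by
  induction u with
  | nil => simp
  | cons y ys ih =>
    simp only [List.cons_append, PySem.List.insertBy, hu y (by simp)]
    simp only [Bool.false_eq_true, if_false, List.cons.injEq, true_and]
    exact ih (fun z hz => hu z (by simp [hz]))

lemma insertBy_of_forall_before {α : Type} (before : α → α → Bool) (x : α) (v : List α)
    (hv : ∀ y ∈ v, before x y = true) :
    PySem.List.insertBy before x v = x :: v := by
  cases v with
  | nil => rfl
  | cons y ys => simp [PySem.List.insertBy, hv y (by simp)]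

lemma insertBy_flatten (ns : List Int) (x : String × Int) (F : Int → List (String × Int))
    (hns : ns.Pairwise (fun a b => b < a))
    (hF : ∀ n ∈ ns, ∀ p ∈ F n, p.2 = n) (hx : x.2 ∈ ns) :
    PySem.List.insertBy (fun a b => decide (b.2 < a.2)) x (ns.flatMap F)
      = ns.flatMap (fun n => F n ++ if x.2 = n then [x] else []) := by
  induction ns with
  | nil => simp at hx
  | cons n ns' ih =>
    rw [List.flatMap_cons, List.flatMap_cons]
    rw [List.pairwise_cons] at hns
    by_cases h : x.2 = n
    · rw [insertBy_append_left _ _ _ _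
        (fun y hy => by simp [hF n (by simp) y hy, h])]
      rw [insertBy_of_forall_before _ _ _
        (fun y hy => by
          obtain ⟨n', hn', hyn'⟩ := List.mem_flatMap.mp hy
          simp [hF n' (by simp [hn']) y hyn', h ▸ hns.1 n' hn'])]
      rw [if_pos h]
      have : ns'.flatMap (fun n => F n ++ if x.2 = n then [x] else []) = ns'.flatMap F := by
        apply List.flatMap_congr
        intro n' hn'
        rw [if_neg (by have := hns.1 n' hn'; omega)]
        simp
      rw [this]; simp
    · have hx' : x.2 ∈ ns' := by rcases List.mem_cons.mp hx with h' | h'; exact absurd h' h; exact h'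
      rw [insertBy_append_left _ _ _ _
        (fun y hy => by
          have hy2 := hF n (by simp) y hy
          have : x.2 < n := hns.1 _ hx'
          simp [hy2]; omega)]
      rw [ih hns.2 (fun n' hn' => hF n' (by simp [hn'])) hx', if_neg h]
      simp

lemma sorted_rev_eq_flatMap_filter (l : List (String × Int)) (ns : List Int)
    (hns : ns.Pairwise (fun a b => b < a)) (hl : ∀ p ∈ l, p.2 ∈ ns) :
    PySem.List.sorted l (fun p => p.2) true
      = ns.flatMap (fun n => l.filter (fun p => p.2 == n)) := by
  rw [PySem.List.sorted_rev_eq_foldl_insertBy]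
  induction l using List.reverseRecOn with
  | nil => simp
  | append_singleton l x ih =>
    rw [List.foldl_append, List.foldl_cons, List.foldl_nil]
    rw [ih (fun p hp => hl p (by simp [hp]))]
    rw [insertBy_flatten ns x _ hns
      (fun n hn p hp => by simpa using List.of_mem_filter hp) (hl x (by simp))]
    apply List.flatMap_congr
    intro n hn
    rw [List.filter_append]
    congr 1
    by_cases h : x.2 = n <;> simp [h]

-- core: both pipelines agree, stated over the common multiset cs of one-char strings
lemma core (cs : List String) :
    ((PySem.List.sorted (PySem.Dict.counter cs).items (fun item => item.2) true).foldl
        (fun d p => d.insert p.1 p.2) PySem.Dict.empty).items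
    = (let buckets : PySem.Dict Int (List String) :=
         (PySem.Dict.counter cs).items.foldl (fun b p => b.modify p.2 [] (· ++ [p.1])) PySem.Dict.empty
       ((PySem.List.pyRange (PySem.List.maxD buckets.keys (fun x => x) 0) 0 (-1)).foldl
          (fun d n => (buckets.getD n []).foldl (fun d ch => d.insert ch n) d)
          PySem.Dict.empty).items) := by
  set items := (PySem.Dict.counter cs).items with hitems
  have hitems' : items = (PySem.Set.ofList cs).map (fun k => (k, (cs.count k : Int))) :=
    PySem.Dict.items_counter cs
  have hknodup : (items.map (·.1)).Nodup := by
    rw [hitems', List.map_map]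
    have : ((fun (x : String × Int) => x.1) ∘ fun k => (k, (cs.count k : Int))) = fun k => k := rfl
    rw [this, List.map_id']
    exact PySem.Set.nodup_ofList cs
  have hpos : ∀ p ∈ items, 1 ≤ p.2 := by
    intro p hp
    rw [hitems'] at hp
    obtain ⟨k, hk, rfl⟩ := List.mem_map.mp hp
    have : k ∈ cs := (PySem.Set.mem_ofList cs k).mp hk
    have := List.count_pos_iff.mpr this
    simpa using this
  set buckets : PySem.Dict Int (List String) :=
    items.foldl (fun b p => b.modify p.2 [] (· ++ [p.1])) PySem.Dict.empty with hbuckets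
  have hbucket : ∀ n, buckets.getD n [] = (items.filter (fun p => p.2 == n)).map (·.1) := by
    intro n
    have : buckets = (items.map Prod.swap).foldl
        (fun b q => b.modify q.1 [] (· ++ [q.2])) PySem.Dict.empty := by
      rw [List.foldl_map]; rfl
    rw [this, PySem.Dict.getD_foldl_modify_append, List.filter_map]
    rw [List.map_map]
    congr 1
  have hkeys : buckets.keys = PySem.Set.ofList (items.map (·.2)) := by
    rw [hbuckets, PySem.Dict.keys_foldl_modify_key items (fun p => p.2) [] (fun _ p v => v ++ [p.1])]
    rw [PySem.Dict.keys_empty, PySem.Set.update_nil_left]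
  set m := PySem.List.maxD buckets.keys (fun x => x) 0 with hm
  set ns := PySem.List.pyRange m 0 (-1) with hns
  have hmemns : ∀ p ∈ items, p.2 ∈ ns := by
    intro p hp
    rw [hns, mem_pyRange_down]
    refine ⟨hpos p hp, ?_⟩
    apply le_maxD_of_mem
    rw [hkeys, PySem.Set.mem_ofList]
    exact List.mem_map.mpr ⟨p, hp, rfl⟩
  have hsorted : PySem.List.sorted items (fun p => p.2) true
      = ns.flatMap (fun n => items.filter (fun p => p.2 == n)) :=
    sorted_rev_eq_flatMap_filter items ns (pairwise_pyRange_down m) hmemns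
  -- B side: double fold = fold over the flattened bucket list
  have hinner : ∀ (n : Int) (d : PySem.Dict String Int),
      (buckets.getD n []).foldl (fun d ch => d.insert ch n) d
        = ((buckets.getD n []).map (fun ch => (ch, n))).foldl (fun d p => d.insert p.1 p.2) d := by
    intro n d; rw [List.foldl_map]
  have hB : (ns.foldl (fun d n => (buckets.getD n []).foldl (fun d ch => d.insert ch n) d)
        PySem.Dict.empty)
      = (ns.flatMap (fun n => (buckets.getD n []).map (fun ch => (ch, n)))).foldl
          (fun d p => d.insert p.1 p.2) PySem.Dict.empty := by
    have hfun : (fun (d : PySem.Dict String Int) (n : Int) =>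
        (buckets.getD n []).foldl (fun d ch => d.insert ch n) d)
        = (fun d n => ((buckets.getD n []).map (fun ch => (ch, n))).foldl
            (fun d p => d.insert p.1 p.2) d) :=
      funext fun d => funext fun n => hinner n d
    rw [List.foldl_flatMap, ← hfun]
  have hbig : ns.flatMap (fun n => (buckets.getD n []).map (fun ch => (ch, n)))
      = ns.flatMap (fun n => items.filter (fun p => p.2 == n)) := by
    apply List.flatMap_congr
    intro n _
    rw [hbucket n, List.map_map]
    refine (List.map_congr_left ?_).trans (List.map_id _)
    intro p hp
    have : p.2 = n := by simpa using List.of_mem_filter hp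
    simp [Function.comp, ← this]
  have hnodupS : ((PySem.List.sorted items (fun p => p.2) true).map (·.1)).Nodup :=
    ((PySem.List.sorted_perm items (fun p => p.2) true).map (·.1)).nodup_iff.mpr hknodup
  have freshA := PySem.Dict.items_foldl_insert_fresh
      (PySem.List.sorted items (fun p => p.2) true) (fun p => p.1) (fun p => p.2)
      (PySem.Dict.empty : PySem.Dict String Int)
      (fun a _ => PySem.Dict.contains_empty _) hnodupS
  have hnodupB : ((ns.flatMap (fun n => (buckets.getD n []).map (fun ch => (ch, n)))).map (·.1)).Nodup := by
    rw [hbig, ← hsorted]; exact hnodupS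
  have freshB := PySem.Dict.items_foldl_insert_fresh
      (ns.flatMap (fun n => (buckets.getD n []).map (fun ch => (ch, n))))
      (fun p => p.1) (fun p => p.2) (PySem.Dict.empty : PySem.Dict String Int)
      (fun a _ => PySem.Dict.contains_empty _) hnodupB
  show _ = ((ns.foldl (fun d n => (buckets.getD n []).foldl (fun d ch => d.insert ch n) d)
        PySem.Dict.empty).items)
  rw [hB, freshA, freshB, hbig, ← hsorted]

-- ===== VERDICT (by name: the statement is the Claim_ definition above) =====
theorem get_ordered_char_map_spec : Claim_equal_get_ordered_char_map := by
  intro words _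
  unfold Spec_get_ordered_char_map get_ordered_char_map get_ordered_char_map_alt
  simp only
  rw [countA_eq_counter]
  rw [show ((PySem.Str.join "" words).toList.foldl
        (fun d c => d.insert (String.ofList [c]) (d.getD (String.ofList [c]) 0 + 1))
        PySem.Dict.empty)
      = PySem.Dict.counter ((PySem.Str.join "" words).toList.map (fun c => String.ofList [c])) from by
    rw [← PySem.Dict.foldl_insert_getD_add_one_eq_counter, List.foldl_map]]
  exact core _
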